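-- pv_equiv track=rewrite | github.com/kartik2309/nlp_disaster_tweets | preprocessing.py | __process_special_symbols
-- ===== SOURCE A (Python) =====
-- def __process_special_symbols(text):
--     text = text.replace('<br />', '')
--     text = text.replace('...', ' ')
--     text = text.replace('.', ' . ')
--     text = text.replace('?', ' ? ')
--     text = text.replace(':', ' : ')
--     text = text.replace(';', ' ; ')
--     text = text.replace('(', ' ( ')
--     text = text.replace(')', ' ) ')
--     text = text.replace('!', ' ? ')
--     text = text.replace("'", "")
--     text = text.replace('"', "")
--
--     text = ' '.join([val.strip() for val in text.split() if val != ' '])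
--
--     return text
-- ===== SOURCE B (Python) =====
-- def __process_special_symbols(text):
--     # Single left-to-right tokenizer: after the break-tag removal pass, one scan
--     # emits word/punctuation tokens directly (no intermediate expanded string).
--     text = text.replace('<br />', '')
--     punct = {'.': '.', '?': '?', ':': ':', ';': ';', '(': '(', ')': ')', '!': '?'}
--     tokens = []
--     word = []
--     i = 0
--     n = len(text)
--     while i < n:
--         c = text[i]
--         if text.startswith('...', i):
--             if word:
--                 tokens.append(''.join(word))
--                 word = []
--             i += 3
--         elif c in punct:
--             if word:
--                 tokens.append(''.join(word))
--                 word = []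
--             tokens.append(punct[c])
--             i += 1
--         elif c == "'" or c == '"':
--             i += 1
--         elif c.isspace():
--             if word:
--                 tokens.append(''.join(word))
--                 word = []
--             i += 1
--         else:
--             word.append(c)
--             i += 1
--     if word:
--         tokens.append(''.join(word))
--     return ' '.join(tokens)
-- ===== Notes on version B (the rewrite author's own statement) =====
-- stated objective: alternative
-- what changed: Instead of eleven sequential replace passes that build expanded intermediate strings and then split/strip them, B keeps only the leading break-tag removal pass and then tokenizes the text in a single left-to-right scan with a word accumulator, emitting word and punctuation tokens directly and joining them once.
import Mathlib
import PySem

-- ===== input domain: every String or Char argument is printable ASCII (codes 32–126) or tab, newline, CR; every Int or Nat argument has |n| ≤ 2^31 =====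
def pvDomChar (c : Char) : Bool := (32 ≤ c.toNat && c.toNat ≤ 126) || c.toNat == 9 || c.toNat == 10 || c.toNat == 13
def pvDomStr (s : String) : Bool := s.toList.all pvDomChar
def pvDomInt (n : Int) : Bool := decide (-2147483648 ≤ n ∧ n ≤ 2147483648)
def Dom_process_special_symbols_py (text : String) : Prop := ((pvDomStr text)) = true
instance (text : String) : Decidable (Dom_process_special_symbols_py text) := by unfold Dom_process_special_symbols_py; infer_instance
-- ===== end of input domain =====

-- B replaces A's eleven staged replace passes plus split/strip by the break-tag removal
-- pass followed by a single left-to-right tokenizer emitting word and punctuation tokens.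

-- ===== PORT A =====
def process_special_symbols_py (text : String) : String :=
  let t1 := PySem.Str.replace text "<br />" ""
  let t2 := PySem.Str.replace t1 "..." " "
  let t3 := PySem.Str.replace t2 "." " . "
  let t4 := PySem.Str.replace t3 "?" " ? "
  let t5 := PySem.Str.replace t4 ":" " : "
  let t6 := PySem.Str.replace t5 ";" " ; "
  let t7 := PySem.Str.replace t6 "(" " ( "
  let t8 := PySem.Str.replace t7 ")" " ) "
  let t9 := PySem.Str.replace t8 "!" " ? "
  let t10 := PySem.Str.replace t9 "'" ""
  let t11 := PySem.Str.replace t10 "\"" ""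
  PySem.Str.join " " (((PySem.Str.split₀ t11).filter (fun v => v ≠ " ")).map PySem.Str.strip)

-- ===== PORT B =====
-- text.startswith('...', i)
def pvDots3 (l : List Char) : Bool := List.isPrefixOf ['.', '.', '.'] l

-- the punct dict of Source B ('!' maps to '?')
def pvPunct? (c : Char) : Option Char :=
  if c = '.' then some '.'
  else if c = '?' then some '?'
  else if c = ':' then some ':'
  else if c = ';' then some ';'
  else if c = '(' then some '('
  else if c = ')' then some ')'
  else if c = '!' then some '?'
  else none

-- the while-loop of Source B: word = current word chars, toks = tokens emitted so far
def pvScanGo (l : List Char) (word : List Char) (toks : List String) : List String :=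
  match l with
  | [] => if word.isEmpty then toks else toks ++ [String.ofList word]
  | c :: rest =>
    if pvDots3 (c :: rest) then
      pvScanGo (rest.drop 2) [] (if word.isEmpty then toks else toks ++ [String.ofList word])
    else
      match pvPunct? c with
      | some p =>
          pvScanGo rest []
            ((if word.isEmpty then toks else toks ++ [String.ofList word]) ++ [String.ofList [p]])
      | none =>
          if c = '\'' ∨ c = '"' then pvScanGo rest word toks
          else if PySem.Chars.isspace c then
            pvScanGo rest [] (if word.isEmpty then toks else toks ++ [String.ofList word])
          else pvScanGo rest (word ++ [c]) toks
termination_by l.length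
decreasing_by all_goals simp [List.length_drop]

def process_special_symbols_py_alt (text : String) : String :=
  let t := PySem.Str.replace text "<br />" ""
  PySem.Str.join " " (pvScanGo t.toList [] [])

-- ===== PRECONDITION & SPEC =====
def Spec_process_special_symbols_py (text : String) (out : String) : Prop := out = process_special_symbols_py_alt text
instance (text : String) (out : String) : Decidable (Spec_process_special_symbols_py text out) := by unfold Spec_process_special_symbols_py; infer_instance

-- ===== CLAIM (what is proved, stated in full; the proofs are below) =====
def Claim_equal_process_special_symbols_py : Prop := ∀ (text : String), Dom_process_special_symbols_py text → Spec_process_special_symbols_py text (process_special_symbols_py text)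

-- ===== LEMMAS AND PROOFS =====

-- proof-side: the per-character table the nine single-char passes of A amount to
def pvTable (c : Char) : List Char :=
  if c = '.' then " . ".toList
  else if c = '?' then " ? ".toList
  else if c = ':' then " : ".toList
  else if c = ';' then " ; ".toList
  else if c = '(' then " ( ".toList
  else if c = ')' then " ) ".toList
  else if c = '!' then " ? ".toList
  else if c = '\'' then []
  else if c = '"' then []
  else [c]

-- proof-side: A's '...' -> ' ' pass as a structural recursion
def pvExpand3 (l : List Char) : List Char :=
  match l with
  | [] => []
  | c :: rest => if pvDots3 (c :: rest) then ' ' :: pvExpand3 (rest.drop 2) else c :: pvExpand3 rest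
termination_by l.length
decreasing_by all_goals simp [List.length_drop]

-- replacing a single-character pattern is a flatMap over the characters
theorem replace_go_single (c : Char) (new : List Char) :
    ∀ (fuel : Nat) (l acc : List Char), l.length ≤ fuel →
      PySem.Chars.replace.go [c] new fuel l acc
        = acc.reverse ++ l.flatMap (fun x => if x = c then new else [x]) := by
  intro fuel
  induction fuel with
  | zero =>
    intro l acc h
    have : l = [] := List.eq_nil_of_length_eq_zero (Nat.le_zero.mp h)
    subst this; simp [PySem.Chars.replace.go]
  | succ n ih =>
    intro l acc h
    cases l with
    | nil => simp [PySem.Chars.replace.go]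
    | cons d t =>
      simp only [PySem.Chars.replace.go]
      by_cases hd : d = c
      · subst hd
        have hp : List.isPrefixOf [d] (d :: t) = true := by simp [List.isPrefixOf]
        rw [if_pos hp]
        simp only [List.length_cons, List.length_nil, List.drop_succ_cons, List.drop_zero]
        rw [ih t (new.reverse ++ acc) (by simpa using Nat.lt_succ_iff.mp (by simpa using h))]
        simp
      · have hp : List.isPrefixOf [c] (d :: t) = false := by
          simp [List.isPrefixOf]; exact fun hh => absurd hh.symm hd
        rw [if_neg (by rw [hp]; simp)]
        rw [ih t (d :: acc) (by simpa using Nat.lt_succ_iff.mp (by simpa using h))]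
        simp [hd]

theorem replace_single (c : Char) (new s : List Char) :
    PySem.Chars.replace s [c] new = s.flatMap (fun x => if x = c then new else [x]) := by
  rw [PySem.Chars.replace]
  rw [if_neg (by simp)]
  simpa using replace_go_single c new s.length s [] (le_refl _)

-- composing the nine single-char passes gives exactly pvTable
theorem nine_passes (s : List Char) :
    (((((((((s.flatMap (fun x => if x = '.' then " . ".toList else [x])).flatMap
      (fun x => if x = '?' then " ? ".toList else [x])).flatMap
      (fun x => if x = ':' then " : ".toList else [x])).flatMap
      (fun x => if x = ';' then " ; ".toList else [x])).flatMap
      (fun x => if x = '(' then " ( ".toList else [x])).flatMap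
      (fun x => if x = ')' then " ) ".toList else [x])).flatMap
      (fun x => if x = '!' then " ? ".toList else [x])).flatMap
      (fun x => if x = '\'' then [] else [x])).flatMap
      (fun x => if x = '"' then [] else [x]))
      = s.flatMap pvTable := by
  simp only [List.flatMap_assoc]
  congr 1
  funext x
  by_cases h1 : x = '.'; · subst h1; decide
  by_cases h2 : x = '?'; · subst h2; decide
  by_cases h3 : x = ':'; · subst h3; decide
  by_cases h4 : x = ';'; · subst h4; decide
  by_cases h5 : x = '('; · subst h5; decide
  by_cases h6 : x = ')'; · subst h6; decide
  by_cases h7 : x = '!'; · subst h7; decide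
  by_cases h8 : x = '\''; · subst h8; decide
  by_cases h9 : x = '"'; · subst h9; decide
  simp [pvTable, h1, h2, h3, h4, h5, h6, h7, h8, h9]

-- every piece produced by split₀ is nonempty and space-free
theorem split₀_go_all (l : List Char) :
    ∀ (cur : List Char) (acc : List (List Char)),
      (∀ x ∈ cur, PySem.Chars.isspace x = false) →
      (∀ p ∈ acc, p ≠ [] ∧ ∀ x ∈ p, PySem.Chars.isspace x = false) →
      ∀ p ∈ PySem.Chars.split₀.go l cur acc, p ≠ [] ∧ ∀ x ∈ p, PySem.Chars.isspace x = false := by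
  induction l with
  | nil =>
    intro cur acc hcur hacc p hp
    by_cases hc : cur.isEmpty = true
    · rw [PySem.Chars.split₀.go, if_pos hc] at hp
      exact hacc p (by simpa using hp)
    · rw [PySem.Chars.split₀.go, if_neg hc] at hp
      simp only [List.reverse_cons, List.mem_reverse, List.mem_append] at hp
      rcases hp with hp | hp
      · exact hacc p (by simpa using hp)
      · simp only [List.mem_singleton] at hp
        subst hp
        refine ⟨by simpa [List.isEmpty_iff] using hc, ?_⟩
        intro x hx
        exact hcur x (by simpa using hx)
  | cons c rest ih =>
    intro cur acc hcur hacc p hp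
    rw [PySem.Chars.split₀.go] at hp
    by_cases hs : PySem.Chars.isspace c = true
    · rw [if_pos hs] at hp
      by_cases hc : cur.isEmpty = true
      · rw [if_pos hc] at hp
        exact ih [] acc (by simp) hacc p hp
      · rw [if_neg hc] at hp
        refine ih [] (cur.reverse :: acc) (by simp) ?_ p hp
        intro q hq
        rcases List.mem_cons.mp hq with hq | hq
        · subst hq
          refine ⟨by simpa [List.isEmpty_iff] using hc, ?_⟩
          intro x hx
          exact hcur x (by simpa using hx)
        · exact hacc q hq
    · rw [if_neg hs] at hp
      refine ih (c :: cur) acc ?_ hacc p hp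
      intro x hx
      rcases List.mem_cons.mp hx with hx | hx
      · subst hx; simpa using hs
      · exact hcur x hx

theorem split₀_pieces (s : List Char) :
    ∀ p ∈ PySem.Chars.split₀ s, p ≠ [] ∧ ∀ x ∈ p, PySem.Chars.isspace x = false := by
  intro p hp
  exact split₀_go_all s [] [] (by simp) (by simp) p hp

theorem dropWhile_all_false (f : Char → Bool) (l : List Char) (h : ∀ x ∈ l, f x = false) :
    l.dropWhile f = l := by
  cases l with
  | nil => rfl
  | cons a t => simp [List.dropWhile, h a (by simp)]

theorem strip_of_space_free (p : List Char) (h : ∀ x ∈ p, PySem.Chars.isspace x = false) :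
    PySem.Str.strip (String.ofList p) = String.ofList p := by
  apply String.toList_inj.mp
  rw [PySem.Str.strip, String.toList_ofList, String.toList_ofList]
  rw [PySem.Chars.strip, PySem.Chars.lstrip, PySem.Chars.rstrip]
  rw [dropWhile_all_false _ _ h]
  rw [dropWhile_all_false _ _ (by intro x hx; exact h x (by simpa using hx))]
  exact List.reverse_reverse p

-- the final comprehension of A is a plain join of split₀
theorem final_stage (u : String) :
    ((PySem.Str.split₀ u).filter (fun v => v ≠ " ")).map PySem.Str.strip = PySem.Str.split₀ u := by
  have hall := split₀_pieces u.toList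
  rw [PySem.Str.split₀.eq_def]
  have h1 : (List.map String.ofList (PySem.Chars.split₀ u.toList)).filter (fun v => v ≠ " ")
      = List.map String.ofList (PySem.Chars.split₀ u.toList) := by
    apply List.filter_eq_self.mpr
    intro v hv
    rcases List.mem_map.mp hv with ⟨p, hp, rfl⟩
    rcases hall p hp with ⟨-, hfree⟩
    simp only [ne_eq, decide_eq_true_eq]
    intro heq
    have hLp : p = [' '] := by
      have := congrArg String.toList heq
      simpa [String.toList_ofList] using this
    have : PySem.Chars.isspace ' ' = false := hfree ' ' (by simp [hLp])
    exact absurd this (by decide)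
  rw [h1, List.map_map]
  apply List.map_congr_left
  intro p hp
  exact strip_of_space_free p (hall p hp).2

-- the nine single-char replaces of A, read through toList, are one pvTable pass
theorem chain_eq (u : String) :
    (PySem.Str.replace (PySem.Str.replace (PySem.Str.replace (PySem.Str.replace
      (PySem.Str.replace (PySem.Str.replace (PySem.Str.replace (PySem.Str.replace
      (PySem.Str.replace u "." " . ") "?" " ? ") ":" " : ") ";" " ; ")
      "(" " ( ") ")" " ) ") "!" " ? ") "'" "") "\"" "").toList
      = u.toList.flatMap pvTable := by
  simp only [PySem.Str.toList_replace]
  have e1 : ("." : String).toList = ['.'] := rfl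
  have e2 : ("?" : String).toList = ['?'] := rfl
  have e3 : (":" : String).toList = [':'] := rfl
  have e4 : (";" : String).toList = [';'] := rfl
  have e5 : ("(" : String).toList = ['('] := rfl
  have e6 : (")" : String).toList = [')'] := rfl
  have e7 : ("!" : String).toList = ['!'] := rfl
  have e8 : ("\'" : String).toList = ['\''] := rfl
  have e9 : ("\"" : String).toList = ['"'] := rfl
  rw [e1, e2, e3, e4, e5, e6, e7, e8, e9]
  rw [replace_single, replace_single, replace_single, replace_single, replace_single,
      replace_single, replace_single, replace_single, replace_single]
  have hnil : ("" : String).toList = [] := rfl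
  rw [hnil]
  exact nine_passes u.toList

-- A's '...' replace is pvExpand3
theorem replace_go_triple :
    ∀ (fuel : Nat) (l acc : List Char), l.length ≤ fuel →
      PySem.Chars.replace.go ['.', '.', '.'] [' '] fuel l acc = acc.reverse ++ pvExpand3 l := by
  intro fuel
  induction fuel with
  | zero =>
    intro l acc h
    have : l = [] := List.eq_nil_of_length_eq_zero (Nat.le_zero.mp h)
    subst this; simp [PySem.Chars.replace.go, pvExpand3]
  | succ n ih =>
    intro l acc h
    cases l with
    | nil => simp [PySem.Chars.replace.go, pvExpand3]
    | cons d t =>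
      simp only [PySem.Chars.replace.go]
      by_cases hp : List.isPrefixOf ['.', '.', '.'] (d :: t) = true
      · rw [if_pos hp]
        rcases List.isPrefixOf_iff_prefix.mp hp with ⟨r, hr⟩
        have hd1 : d = '.' := by cases hr; rfl
        have hd2 : t = '.' :: '.' :: r := by cases hr; rfl
        subst hd1; subst hd2
        have hlen : r.length ≤ n := by simp only [List.length_cons] at h; omega
        have hdrop : List.drop (['.', '.', '.'] : List Char).length ('.' :: '.' :: '.' :: r) = r := rfl
        rw [hdrop, ih r ([' '].reverse ++ acc) hlen]
        have hexp : pvExpand3 ('.' :: '.' :: '.' :: r) = ' ' :: pvExpand3 r := by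
          rw [pvExpand3, if_pos (by simp [pvDots3, List.isPrefixOf])]
          rfl
        rw [hexp]
        simp
      · rw [if_neg hp]
        have hlen : t.length ≤ n := by simp only [List.length_cons] at h; omega
        rw [ih t (d :: acc) hlen]
        have hexp : pvExpand3 (d :: t) = d :: pvExpand3 t := by
          rw [pvExpand3, if_neg (by simpa [pvDots3] using hp)]
        rw [hexp]; simp

theorem replace_triple (s : List Char) :
    PySem.Chars.replace s ['.', '.', '.'] [' '] = pvExpand3 s := by
  rw [PySem.Chars.replace, if_neg (by simp)]
  simpa using replace_go_triple s.length s [] (le_refl _)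

-- split₀.go accumulator lemma
theorem split₀_go_acc (l : List Char) :
    ∀ (cur : List Char) (acc : List (List Char)),
      PySem.Chars.split₀.go l cur acc = acc.reverse ++ PySem.Chars.split₀.go l cur [] := by
  induction l with
  | nil =>
    intro cur acc
    by_cases hc : cur.isEmpty = true <;> simp [PySem.Chars.split₀.go, hc]
  | cons c rest ih =>
    intro cur acc
    rw [PySem.Chars.split₀.go, PySem.Chars.split₀.go]
    by_cases hs : PySem.Chars.isspace c = true
    · rw [if_pos hs, if_pos hs]
      by_cases hc : cur.isEmpty = true
      · rw [if_pos hc, if_pos hc, ih]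
      · rw [if_neg hc, if_neg hc, ih [] (cur.reverse :: acc), ih [] [cur.reverse]]
        simp
    · rw [if_neg hs, if_neg hs, ih]

-- a character the scanner keeps inside a word maps to itself in pvTable and is not a space
theorem pvTable_word (c : Char) (h1 : pvPunct? c = none) (h2 : ¬(c = '\'' ∨ c = '"')) :
    pvTable c = [c] := by
  unfold pvPunct? at h1
  rw [not_or] at h2
  split_ifs at h1
  unfold pvTable
  simp_all

-- the punctuation expansion pvTable gives on a punct char
theorem pvTable_punct (c p : Char) (h : pvPunct? c = some p) :
    pvTable c = [' ', p, ' '] ∧ PySem.Chars.isspace p = false := by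
  unfold pvPunct? at h
  split_ifs at h <;> simp_all <;> subst h <;> constructor <;> decide

theorem pvTable_quote (c : Char) (h : c = '\'' ∨ c = '"') : pvTable c = [] := by
  rcases h with h | h <;> subst h <;> decide

-- MAIN: the scanner equals split₀ of the pvTable-expanded pvExpand3-replaced text
theorem rev_isEmpty (w : List Char) : w.reverse.isEmpty = w.isEmpty := by
  cases w <;> simp

theorem scan_eq (n : Nat) :
    ∀ (l : List Char), l.length ≤ n → ∀ (word : List Char) (toks : List String),
      pvScanGo l word toks
        = toks ++ (PySem.Chars.split₀.go (List.flatMap pvTable (pvExpand3 l)) word.reverse []).map String.ofList := by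
  induction n with
  | zero =>
    intro l hl word toks
    have : l = [] := List.eq_nil_of_length_eq_zero (Nat.le_zero.mp hl)
    subst this
    rw [pvScanGo, pvExpand3]
    simp only [List.flatMap_nil, PySem.Chars.split₀.go, rev_isEmpty]
    by_cases hw : word.isEmpty = true <;> simp [hw]
  | succ n ih =>
    intro l hl word toks
    cases l with
    | nil =>
      rw [pvScanGo, pvExpand3]
      simp only [List.flatMap_nil, PySem.Chars.split₀.go, rev_isEmpty]
      by_cases hw : word.isEmpty = true <;> simp [hw]
    | cons c rest =>
      rw [pvScanGo, pvExpand3]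
      by_cases hd : pvDots3 (c :: rest) = true
      · rw [if_pos hd, if_pos hd]
        have hlen : (rest.drop 2).length ≤ n := by
          simp only [List.length_cons] at hl
          simp only [List.length_drop]; omega
        rw [ih (rest.drop 2) hlen [] _]
        simp only [List.flatMap_cons, (by decide : pvTable ' ' = [' ']), List.singleton_append,
          PySem.Chars.split₀.go, (by decide : PySem.Chars.isspace ' ' = true), if_true, rev_isEmpty]
        by_cases hw : word.isEmpty = true
        · simp [hw]
        · rw [if_neg hw, if_neg hw, split₀_go_acc _ [] [word.reverse.reverse]]
          simp
      · rw [if_neg hd, if_neg hd]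
        have hlen : rest.length ≤ n := by simp only [List.length_cons] at hl; omega
        cases hpc : pvPunct? c with
        | some p =>
          rcases pvTable_punct c p hpc with ⟨htab, hpsp⟩
          simp only [List.flatMap_cons, htab]
          have step2 : ∀ acc, PySem.Chars.split₀.go (p :: ' ' :: List.flatMap pvTable (pvExpand3 rest)) [] acc
              = acc.reverse ++ [[p]] ++ PySem.Chars.split₀.go (List.flatMap pvTable (pvExpand3 rest)) [] [] := by
            intro acc
            rw [PySem.Chars.split₀.go, if_neg (show ¬ PySem.Chars.isspace p = true by simp [hpsp])]
            rw [PySem.Chars.split₀.go, if_pos (show PySem.Chars.isspace ' ' = true by decide),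
              if_neg (show ¬ (([p] : List Char).isEmpty = true) by simp)]
            rw [split₀_go_acc _ [] ([p].reverse :: acc)]
            simp
          have hgo : PySem.Chars.split₀.go ([' ', p, ' '] ++ List.flatMap pvTable (pvExpand3 rest)) word.reverse []
              = PySem.Chars.split₀.go (p :: ' ' :: List.flatMap pvTable (pvExpand3 rest)) []
                  (if word.isEmpty then [] else [word.reverse.reverse]) := by
            rw [List.cons_append, PySem.Chars.split₀.go,
              if_pos (show PySem.Chars.isspace ' ' = true by decide), rev_isEmpty]
            by_cases hw : word.isEmpty = true <;> simp [hw]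
          rw [hgo, step2, ih rest hlen]
          by_cases hw : word.isEmpty = true <;> simp [hw]
        | none =>
          by_cases hq : c = '\'' ∨ c = '"'
          · rw [if_pos hq]
            simp only [List.flatMap_cons, pvTable_quote c hq, List.nil_append]
            exact ih rest hlen word toks
          · rw [if_neg hq]
            simp only [List.flatMap_cons, pvTable_word c hpc hq, List.singleton_append]
            by_cases hs : PySem.Chars.isspace c = true
            · rw [if_pos hs]
              rw [ih rest hlen [] _]
              rw [PySem.Chars.split₀.go, if_pos hs]
              simp only [rev_isEmpty]
              by_cases hw : word.isEmpty = true
              · simp [hw]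
              · rw [if_neg hw, if_neg hw, split₀_go_acc _ [] [word.reverse.reverse]]
                simp
            · rw [if_neg hs]
              rw [ih rest hlen (word ++ [c]) toks]
              rw [PySem.Chars.split₀.go, if_neg hs]
              simp

-- ===== VERDICT (by name: the statement is the Claim_ definition above) =====
theorem process_special_symbols_py_spec : Claim_equal_process_special_symbols_py := by
  intro text _
  unfold Spec_process_special_symbols_py
  simp only [process_special_symbols_py, process_special_symbols_py_alt]
  rw [final_stage]
  rw [scan_eq _ _ (le_refl _)]
  rw [PySem.Str.split₀.eq_def]
  have hmid : (PySem.Str.replace (PySem.Str.replace text "<br />" "") "..." " ").toList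
      = pvExpand3 (PySem.Str.replace text "<br />" "").toList := by
    rw [PySem.Str.toList_replace]
    have e1 : ("..." : String).toList = ['.', '.', '.'] := rfl
    have e2 : (" " : String).toList = [' '] := rfl
    rw [e1, e2, replace_triple]
  rw [chain_eq, hmid]
  rw [PySem.Chars.split₀]
  simp
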